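-- pv_equiv track=rewrite | github.com/kryzin/analiza_generacja_poezja_pl | gen/models/generator.py | check_rhyme_scheme
-- ===== SOURCE A (Python) =====
-- def check_rhyme_scheme(suffixes, scheme):
--     scheme = scheme.replace(" ", "").upper()
--     if len(suffixes) != len(scheme):
--         return False
--     rhyme_groups = {}
--     for idx, symbol in enumerate(scheme):
--         if symbol not in rhyme_groups:
--             rhyme_groups[symbol] = suffixes[idx]
--         elif rhyme_groups[symbol] != suffixes[idx]:
--             return False
--     return True
-- ===== SOURCE B (Python) =====
-- def check_rhyme_scheme(suffixes, scheme):
--     scheme = scheme.replace(" ", "").upper()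
--     if len(suffixes) != len(scheme):
--         return False
--     groups = {}
--     for sym, suf in zip(scheme, suffixes):
--         groups.setdefault(sym, []).append(suf)
--     for group in groups.values():
--         first = group[0]
--         for suf in group:
--             if suf != first:
--                 return False
--     return True
-- ===== Notes on version B (the rewrite author's own statement) =====
-- stated objective: alternative
-- what changed: Replaces A's single early-exit pass (dict of first suffix per symbol, compared in-loop) with a two-phase shape: first fully partition the suffixes into groups per symbol via zip+setdefault, then check each group is uniform against its first element.
import Mathlib
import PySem

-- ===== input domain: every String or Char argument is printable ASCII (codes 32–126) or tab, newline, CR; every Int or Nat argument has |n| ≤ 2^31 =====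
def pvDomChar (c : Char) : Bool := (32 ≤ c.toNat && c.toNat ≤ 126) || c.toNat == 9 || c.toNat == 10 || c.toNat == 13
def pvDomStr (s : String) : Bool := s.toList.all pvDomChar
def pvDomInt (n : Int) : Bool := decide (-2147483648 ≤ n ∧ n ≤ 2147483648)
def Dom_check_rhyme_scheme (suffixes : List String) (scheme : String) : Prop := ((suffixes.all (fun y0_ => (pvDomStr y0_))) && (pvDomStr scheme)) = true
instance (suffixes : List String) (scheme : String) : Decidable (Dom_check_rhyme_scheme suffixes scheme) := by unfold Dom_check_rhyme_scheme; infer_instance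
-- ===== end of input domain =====

-- B replaces A's early-exit single pass (dict of first suffix per symbol, compared in-loop)
-- with a two-phase shape: fully partition suffixes into per-symbol groups, then check each
-- group uniform against its first element. Objective: alternative decomposition, same cost.

-- ===== PORT A =====
-- the for-loop over enumerate(scheme): idx is the running enumerate counter
def pvALoop (suffixes : List String) : Nat → List Char → PySem.Dict Char String → Bool
  | _, [], _ => true
  | idx, sym :: rest, d =>
    match d.get? sym with
    | none =>
      match PySem.List.pyGet? suffixes (idx : Int) with
      | none => false  -- IndexError; unreachable because the length check passed
      | some suf => pvALoop suffixes (idx + 1) rest (d.insert sym suf)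
    | some v =>
      match PySem.List.pyGet? suffixes (idx : Int) with
      | none => false  -- IndexError; unreachable because the length check passed
      | some suf => if v ≠ suf then false else pvALoop suffixes (idx + 1) rest d

def check_rhyme_scheme (suffixes : List String) (scheme : String) : Bool :=
  let scheme' := PySem.Str.upper (PySem.Str.replace scheme " " "")
  if suffixes.length ≠ scheme'.toList.length then false
  else pvALoop suffixes 0 scheme'.toList PySem.Dict.empty

-- ===== PORT B =====
-- "first = group[0]; for suf in group: if suf != first: return False" over one group
def pvUniform (g : List String) : Bool :=
  match g with
  | [] => true  -- unreachable: every built group is nonempty (group[0] would raise on [])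
  | first :: rest => (first :: rest).all (fun suf => suf == first)

def check_rhyme_scheme_alt (suffixes : List String) (scheme : String) : Bool :=
  let scheme' := PySem.Str.upper (PySem.Str.replace scheme " " "")
  if suffixes.length ≠ scheme'.toList.length then false
  else
    let groups := (scheme'.toList.zip suffixes).foldl
      (fun d p => d.modify p.1 [] (fun g => g ++ [p.2])) PySem.Dict.empty
    groups.values.all pvUniform

-- ===== PRECONDITION & SPEC =====
def Spec_check_rhyme_scheme (suffixes : List String) (scheme : String) (out : Bool) : Prop := out = check_rhyme_scheme_alt suffixes scheme
instance (suffixes : List String) (scheme : String) (out : Bool) : Decidable (Spec_check_rhyme_scheme suffixes scheme out) := by unfold Spec_check_rhyme_scheme; infer_instance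

-- ===== CLAIM (what is proved, stated in full; the proofs are below) =====
def Claim_equal_check_rhyme_scheme : Prop := ∀ (suffixes : List String) (scheme : String), Dom_check_rhyme_scheme suffixes scheme → Spec_check_rhyme_scheme suffixes scheme (check_rhyme_scheme suffixes scheme)

-- ===== LEMMAS AND PROOFS =====

-- proof-side view of A's loop over the zipped pairs
def pvAZip : List (Char × String) → PySem.Dict Char String → Bool
  | [], _ => true
  | (sym, suf) :: rest, d =>
    match d.get? sym with
    | none => pvAZip rest (d.insert sym suf)
    | some v => if v ≠ suf then false else pvAZip rest d

-- the common semantic content: all pairs with equal symbol carry equal suffixes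
def pvOK (pairs : List (Char × String)) : Prop :=
  ∀ p ∈ pairs, ∀ q ∈ pairs, p.1 = q.1 → p.2 = q.2

theorem pvALoop_eq_zip (suffixes : List String) (chars : List Char) (idx : Nat)
    (d : PySem.Dict Char String) (h : idx + chars.length ≤ suffixes.length) :
    pvALoop suffixes idx chars d = pvAZip (chars.zip (suffixes.drop idx)) d := by
  induction chars generalizing idx d with
  | nil => simp [pvALoop, pvAZip]
  | cons c cs ih =>
    have hlt : idx < suffixes.length := by simp at h; omega
    have h' : idx + 1 + cs.length ≤ suffixes.length := by simp at h; omega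
    have hg : PySem.List.pyGet? suffixes (idx : Int) = some suffixes[idx] := by
      rw [PySem.List.pyGet?_natCast]; exact List.getElem?_eq_getElem hlt
    have hd : suffixes.drop idx = suffixes[idx] :: suffixes.drop (idx + 1) :=
      List.drop_eq_getElem_cons hlt
    cases hdc : d.get? c with
    | none =>
      simp only [pvALoop, pvAZip, hg, hd, hdc, List.zip_cons_cons]
      exact ih (idx + 1) (d.insert c suffixes[idx]) h'
    | some v =>
      simp only [pvALoop, pvAZip, hg, hd, hdc, List.zip_cons_cons]
      by_cases hv : v ≠ suffixes[idx]
      · rw [if_pos hv, if_pos hv]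
      · rw [if_neg hv, if_neg hv]
        exact ih (idx + 1) d h'

theorem pvAZip_true_iff (pairs : List (Char × String)) (d : PySem.Dict Char String) :
    pvAZip pairs d = true ↔
      pvOK pairs ∧ ∀ p ∈ pairs, ∀ v, d.get? p.1 = some v → p.2 = v := by
  induction pairs generalizing d with
  | nil => simp [pvAZip, pvOK]
  | cons hd rest ih =>
    obtain ⟨c, s⟩ := hd
    cases hdc : d.get? c with
    | none =>
      simp only [pvAZip, hdc]
      rw [ih]
      constructor
      · rintro ⟨hok, hcomp⟩
        refine ⟨?_, ?_⟩
        · intro p hp q hq hpq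
          rcases List.mem_cons.mp hp with rfl | hp' <;> rcases List.mem_cons.mp hq with rfl | hq'
          · rfl
          · have hq1 : q.1 = c := hpq.symm
            have : (d.insert c s).get? q.1 = some s := by
              rw [PySem.Dict.get?_insert, if_pos hq1]
            exact (hcomp q hq' s this).symm
          · have hp1 : p.1 = c := hpq
            have : (d.insert c s).get? p.1 = some s := by
              rw [PySem.Dict.get?_insert, if_pos hp1]
            exact hcomp p hp' s this
          · exact hok p hp' q hq' hpq
        · intro p hp v hv
          rcases List.mem_cons.mp hp with rfl | hp'
          · have hv' : d.get? c = some v := hv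
            rw [hdc] at hv'; cases hv'
          · by_cases hc : p.1 = c
            · rw [hc, hdc] at hv; cases hv
            · refine hcomp p hp' v ?_
              rw [PySem.Dict.get?_insert, if_neg hc]; exact hv
      · rintro ⟨hok, hcomp⟩
        refine ⟨?_, ?_⟩
        · intro p hp q hq hpq
          exact hok p (List.mem_cons_of_mem _ hp) q (List.mem_cons_of_mem _ hq) hpq
        · intro p hp v hv
          rw [PySem.Dict.get?_insert] at hv
          by_cases hc : p.1 = c
          · rw [if_pos hc] at hv
            have hvs : v = s := (Option.some.inj hv).symm
            have hps : p.2 = s :=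
              hok p (List.mem_cons_of_mem _ hp) (c, s) (List.mem_cons_self) hc
            rw [hps, hvs]
          · rw [if_neg hc] at hv
            exact hcomp p (List.mem_cons_of_mem _ hp) v hv
    | some w =>
      simp only [pvAZip, hdc]
      by_cases hws : w ≠ s
      · rw [if_pos hws]
        simp only [Bool.false_eq_true, false_iff]
        rintro ⟨-, hcomp⟩
        exact hws ((hcomp (c, s) (List.mem_cons_self) w hdc).symm)
      · rw [if_neg hws]
        rw [not_ne_iff] at hws
        rw [ih]
        constructor
        · rintro ⟨hok, hcomp⟩
          refine ⟨?_, ?_⟩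
          · intro p hp q hq hpq
            rcases List.mem_cons.mp hp with rfl | hp' <;> rcases List.mem_cons.mp hq with rfl | hq'
            · rfl
            · have : d.get? q.1 = some w := by rw [← hpq]; exact hdc
              have := hcomp q hq' w this
              rw [this, hws]
            · have : d.get? p.1 = some w := by rw [hpq]; exact hdc
              have := hcomp p hp' w this
              rw [this, hws]
            · exact hok p hp' q hq' hpq
          · intro p hp v hv
            rcases List.mem_cons.mp hp with rfl | hp'
            · have hv' : d.get? c = some v := hv
              rw [hdc] at hv'
              exact (((Option.some.inj hv').symm).trans hws).symm
            · exact hcomp p hp' v hv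
        · rintro ⟨hok, hcomp⟩
          exact ⟨fun p hp q hq hpq => hok p (List.mem_cons_of_mem _ hp) q (List.mem_cons_of_mem _ hq) hpq,
                 fun p hp v hv => hcomp p (List.mem_cons_of_mem _ hp) v hv⟩

theorem pvUniform_iff (g : List String) :
    pvUniform g = true ↔ ∀ x ∈ g, ∀ y ∈ g, x = y := by
  cases g with
  | nil => simp [pvUniform]
  | cons a l =>
    simp only [pvUniform, List.all_cons, beq_self_eq_true, Bool.true_and, List.all_eq_true,
      beq_iff_eq]
    constructor
    · intro h x hx y hy
      have hx' : x = a := by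
        rcases List.mem_cons.mp hx with rfl | hx'
        · rfl
        · exact h x hx'
      have hy' : y = a := by
        rcases List.mem_cons.mp hy with rfl | hy'
        · rfl
        · exact h y hy'
      rw [hx', hy']
    · intro h x hx
      exact h x (List.mem_cons_of_mem a hx) a (List.mem_cons_self)

theorem pvB_true_iff (pairs : List (Char × String)) :
    ((pairs.foldl (fun d p => d.modify p.1 [] (fun g => g ++ [p.2]))
        PySem.Dict.empty).values.all pvUniform) = true ↔ pvOK pairs := by
  have hnd : (pairs.foldl (fun d p => d.modify p.1 [] (fun g => g ++ [p.2]))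
      PySem.Dict.empty).keys.Nodup :=
    PySem.Dict.nodup_keys_foldl_modify_key _ _ _ _ _ (by simp)
  have hget : ∀ c, (pairs.foldl (fun d p => d.modify p.1 [] (fun g => g ++ [p.2]))
      PySem.Dict.empty).getD c []
      = (pairs.filter (fun p => p.1 == c)).map (·.2) := by
    intro c
    rw [PySem.Dict.getD_foldl_modify_append]
    simp [PySem.Dict.getD_empty]
  have hvals : (pairs.foldl (fun d p => d.modify p.1 [] (fun g => g ++ [p.2]))
      PySem.Dict.empty).values
      = (pairs.foldl (fun d p => d.modify p.1 [] (fun g => g ++ [p.2]))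
          PySem.Dict.empty).keys.map
        (fun k => (pairs.foldl (fun d p => d.modify p.1 [] (fun g => g ++ [p.2]))
          PySem.Dict.empty).getD k []) :=
    PySem.Dict.values_eq_map_keys _ hnd []
  rw [List.all_eq_true]
  constructor
  · intro h p hp q hq hpq
    have hmemp : p.2 ∈ (pairs.foldl (fun d p => d.modify p.1 [] (fun g => g ++ [p.2]))
        PySem.Dict.empty).getD p.1 [] := by
      rw [hget]
      exact List.mem_map.mpr ⟨p, List.mem_filter.mpr ⟨hp, by simp⟩, rfl⟩
    have hmemq : q.2 ∈ (pairs.foldl (fun d p => d.modify p.1 [] (fun g => g ++ [p.2]))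
        PySem.Dict.empty).getD p.1 [] := by
      rw [hget]
      exact List.mem_map.mpr ⟨q, List.mem_filter.mpr ⟨hq, by simp [hpq.symm]⟩, rfl⟩
    have hkey : p.1 ∈ (pairs.foldl (fun d p => d.modify p.1 [] (fun g => g ++ [p.2]))
        PySem.Dict.empty).keys := by
      by_contra hnc
      have hce : (pairs.foldl (fun d p => d.modify p.1 [] (fun g => g ++ [p.2]))
          PySem.Dict.empty).getD p.1 [] = [] :=
        PySem.Dict.getD_of_not_contains _ _
          (by rw [PySem.Dict.contains_eq_decide_mem_keys]; simp [hnc])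
      rw [hce] at hmemp
      cases hmemp
    have huni := h _ (by rw [hvals]; exact List.mem_map.mpr ⟨p.1, hkey, rfl⟩)
    rw [pvUniform_iff] at huni
    exact huni p.2 hmemp q.2 hmemq
  · intro hok g hg
    rw [hvals] at hg
    obtain ⟨k, hk, rfl⟩ := List.mem_map.mp hg
    rw [pvUniform_iff]
    intro x hx y hy
    rw [hget] at hx hy
    obtain ⟨p, hpf, rfl⟩ := List.mem_map.mp hx
    obtain ⟨hp, hpk⟩ := List.mem_filter.mp hpf
    obtain ⟨q, hqf, rfl⟩ := List.mem_map.mp hy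
    obtain ⟨hq, hqk⟩ := List.mem_filter.mp hqf
    exact hok p hp q hq (by rw [beq_iff_eq] at hpk hqk; rw [hpk, hqk])

theorem pv_key (sufs : List String) (sch : List Char) :
    (if sufs.length ≠ sch.length then false else pvALoop sufs 0 sch PySem.Dict.empty)
    = (if sufs.length ≠ sch.length then false
       else ((sch.zip sufs).foldl (fun d p => d.modify p.1 [] (fun g => g ++ [p.2]))
          PySem.Dict.empty).values.all pvUniform) := by
  by_cases hlen : sufs.length = sch.length
  · rw [if_neg (fun hc => hc hlen), if_neg (fun hc => hc hlen)]
    rw [pvALoop_eq_zip sufs sch 0 _ (by omega), List.drop_zero]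
    have hA := pvAZip_true_iff (sch.zip sufs) PySem.Dict.empty
    have hA' : pvAZip (sch.zip sufs) PySem.Dict.empty = true ↔ pvOK (sch.zip sufs) := by
      rw [hA]; simp [PySem.Dict.get?_empty]
    have hB := pvB_true_iff (sch.zip sufs)
    have hbool : ∀ (x y : Bool), (x = true ↔ y = true) → x = y := by decide
    exact hbool _ _ (hA'.trans hB.symm)
  · rw [if_pos hlen, if_pos hlen]

-- ===== VERDICT (by name: the statement is the Claim_ definition above) =====
theorem check_rhyme_scheme_spec : Claim_equal_check_rhyme_scheme := by
  intro suffixes scheme _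
  show check_rhyme_scheme suffixes scheme = check_rhyme_scheme_alt suffixes scheme
  exact pv_key suffixes (PySem.Str.upper (PySem.Str.replace scheme " " "")).toList
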